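-- pv_equiv track=rewrite | github.com/JSDumbuya/ReqRank | backend/dependencies.py | group_dependencies
-- ===== SOURCE A (Python) =====
-- from collections import defaultdict
--
-- def group_dependencies(num_reqs, dependencies):
--     graph = defaultdict(list)
--     for i, j, _ in dependencies:
--         graph[i].append(j)
--         graph[j].append(i)
--
--     visited = set()
--     groups = []
--
--     def dfs(node, group):
--         visited.add(node)
--         group.append(node)
--         for neighbor in graph[node]:
--             if neighbor not in visited:
--                 dfs(neighbor, group)
--
--     for i in range(num_reqs):
--         if i not in visited:
--             group = []
--             dfs(i, group)
--             if group:
--                 groups.append(group)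
--
--     return groups
-- ===== SOURCE B (Python) =====
-- from collections import defaultdict
--
-- def group_dependencies(num_reqs, dependencies):
--     graph = defaultdict(list)
--     for i, j, _ in dependencies:
--         graph[i].append(j)
--         graph[j].append(i)
--
--     visited = set()
--     groups = []
--
--     for i in range(num_reqs):
--         if i in visited:
--             continue
--         visited.add(i)
--         group = [i]
--         stack = [iter(graph[i])]
--         while stack:
--             try:
--                 n = next(stack[-1])
--             except StopIteration:
--                 stack.pop()
--                 continue
--             if n not in visited:
--                 visited.add(n)
--                 group.append(n)
--                 stack.append(iter(graph[n]))
--         groups.append(group)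
--
--     return groups
-- ===== Notes on version B (the rewrite author's own statement) =====
-- stated objective: alternative
-- what changed: The recursive dfs helper is replaced by an iterative DFS using an explicit stack of neighbor iterators that reproduces the exact recursion pre-order, so no RecursionError is possible on deep components.
import Mathlib
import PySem

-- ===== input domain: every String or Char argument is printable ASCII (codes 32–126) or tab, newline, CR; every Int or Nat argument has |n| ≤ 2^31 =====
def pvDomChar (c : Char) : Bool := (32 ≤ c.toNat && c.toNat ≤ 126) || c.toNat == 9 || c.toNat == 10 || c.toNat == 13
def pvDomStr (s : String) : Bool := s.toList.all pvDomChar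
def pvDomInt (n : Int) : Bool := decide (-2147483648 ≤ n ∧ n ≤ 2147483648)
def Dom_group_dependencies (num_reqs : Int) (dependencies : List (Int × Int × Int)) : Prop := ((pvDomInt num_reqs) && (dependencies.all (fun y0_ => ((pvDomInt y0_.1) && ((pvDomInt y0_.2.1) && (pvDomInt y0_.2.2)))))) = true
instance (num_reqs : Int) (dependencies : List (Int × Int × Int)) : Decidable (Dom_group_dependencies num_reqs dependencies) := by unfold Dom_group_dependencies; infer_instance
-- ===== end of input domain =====

-- B replaces A's recursive dfs by an iterative DFS over an explicit stack of neighbor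
-- iterators that reproduces the exact recursion pre-order (objective: alternative).

-- Both Pythons build the graph with the identical defaultdict loop; shared helper.
def pvBuildGraph (dependencies : List (Int × Int × Int)) : PySem.Dict Int (List Int) :=
  dependencies.foldl
    (fun g t => (g.modify t.1 [] (· ++ [t.2.1])).modify t.2.1 [] (· ++ [t.1]))
    PySem.Dict.empty

-- ===== PORT A =====
-- A's recursive dfs.  The Nat is a fuel bound on recursion depth (a totality guard only;
-- the first component of the result is the fuel consumed, threaded for termination).
mutual
def pvDfsA (g : PySem.Dict Int (List Int)) : Nat → Int → PySem.Set Int → List Int → Nat × PySem.Set Int × List Int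
  | 0, _, visited, group => (0, visited, group)
  | fuel+1, node, visited, group =>
      let r := pvNbrsA g fuel (g.getD node []) (PySem.Set.add visited node) (group ++ [node])
      (r.1 + 1, r.2)
termination_by fuel _ _ _ => (fuel, 0)
decreasing_by exact Prod.Lex.left _ _ (Nat.lt_succ_self fuel)

def pvNbrsA (g : PySem.Dict Int (List Int)) : Nat → List Int → PySem.Set Int → List Int → Nat × PySem.Set Int × List Int
  | _, [], visited, group => (0, visited, group)
  | fuel, n :: rest, visited, group =>
      if PySem.Set.contains visited n then pvNbrsA g fuel rest visited group
      else
        let r := pvDfsA g fuel n visited group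
        let r2 := pvNbrsA g (fuel - r.1) rest r.2.1 r.2.2
        (r.1 + r2.1, r2.2)
termination_by fuel nbrs _ _ => (fuel, nbrs.length + 1)
decreasing_by
  · exact Prod.Lex.right _ (by simp only [List.length_cons]; omega)
  · exact Prod.Lex.right _ (by simp only [List.length_cons]; omega)
  · rcases (Nat.sub_le fuel r.1).lt_or_eq with h | h
    · exact Prod.Lex.left _ _ h
    · rw [h]; exact Prod.Lex.right _ (by simp only [List.length_cons]; omega)
end

def group_dependencies (num_reqs : Int) (dependencies : List (Int × Int × Int)) : List (List Int) :=
  let graph := pvBuildGraph dependencies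
  let fuel := num_reqs.toNat + 2 * dependencies.length + 1   -- enough for any component
  ((PySem.List.pyRange 0 num_reqs 1).foldl
    (fun (st : PySem.Set Int × List (List Int)) i =>
      if PySem.Set.contains st.1 i then st
      else
        let r := pvDfsA graph fuel i st.1 []
        (r.2.1, if r.2.2.isEmpty then st.2 else st.2 ++ [r.2.2]))
    (PySem.Set.empty, [])).2

-- ===== PORT B =====
-- B's while-loop over the stack of iterators; an iterator is the list of neighbors not
-- yet yielded.  The Nat is per-visit fuel (totality guard only).
def pvRunB (g : PySem.Dict Int (List Int)) : Nat → List (List Int) → PySem.Set Int → List Int → PySem.Set Int × List Int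
  | _, [], visited, group => (visited, group)
  | fuel, [] :: stack, visited, group => pvRunB g fuel stack visited group   -- StopIteration: pop
  | fuel, (n :: rest) :: stack, visited, group =>
      if PySem.Set.contains visited n then pvRunB g fuel (rest :: stack) visited group
      else
        match fuel with
        | 0 => pvRunB g 0 (rest :: stack) visited group
        | fuel+1 =>
            pvRunB g fuel (g.getD n [] :: rest :: stack) (PySem.Set.add visited n) (group ++ [n])
termination_by fuel stack _ _ => (fuel, stack.foldr (fun l s => l.length + 1 + s) 0)

def group_dependencies_alt (num_reqs : Int) (dependencies : List (Int × Int × Int)) : List (List Int) :=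
  let graph := pvBuildGraph dependencies
  let fuel := num_reqs.toNat + 2 * dependencies.length   -- enough for any component
  ((PySem.List.pyRange 0 num_reqs 1).foldl
    (fun (st : PySem.Set Int × List (List Int)) i =>
      if PySem.Set.contains st.1 i then st
      else
        let r := pvRunB graph fuel [graph.getD i []] (PySem.Set.add st.1 i) [i]
        (r.1, st.2 ++ [r.2]))
    (PySem.Set.empty, [])).2

-- ===== PRECONDITION & SPEC =====
def Spec_group_dependencies (num_reqs : Int) (dependencies : List (Int × Int × Int)) (out : List (List Int)) : Prop := out = group_dependencies_alt num_reqs dependencies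
instance (num_reqs : Int) (dependencies : List (Int × Int × Int)) (out : List (List Int)) : Decidable (Spec_group_dependencies num_reqs dependencies out) := by unfold Spec_group_dependencies; infer_instance

-- ===== CLAIM (what is proved, stated in full; the proofs are below) =====
def Claim_equal_group_dependencies : Prop := ∀ (num_reqs : Int) (dependencies : List (Int × Int × Int)), Dom_group_dependencies num_reqs dependencies → Spec_group_dependencies num_reqs dependencies (group_dependencies num_reqs dependencies)

-- ===== LEMMAS AND PROOFS =====

-- The stack machine, run on a frame `nbrs` over any lower stack, computes exactly what
-- A's neighbor loop computes and then continues with the lower stack.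
theorem pvRunB_sim (g : PySem.Dict Int (List Int)) :
    ∀ (fuel : Nat) (nbrs : List Int) (v : PySem.Set Int) (gr : List Int) (stack : List (List Int)),
      pvRunB g fuel (nbrs :: stack) v gr =
        pvRunB g (fuel - (pvNbrsA g fuel nbrs v gr).1) stack
          (pvNbrsA g fuel nbrs v gr).2.1 (pvNbrsA g fuel nbrs v gr).2.2 := by
  intro fuel
  induction fuel using Nat.strong_induction_on with
  | _ fuel IH =>
    intro nbrs
    induction nbrs with
    | nil => intro v gr stack; simp [pvRunB, pvNbrsA]
    | cons n rest IH2 =>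
      intro v gr stack
      by_cases hc : PySem.Set.contains v n = true
      · conv_lhs => rw [pvRunB.eq_def]
        simp only [hc, if_true, pvNbrsA]
        exact IH2 v gr stack
      · rw [Bool.not_eq_true] at hc
        cases fuel with
        | zero =>
          conv_lhs => rw [pvRunB.eq_def]
          simp only [hc, Bool.false_eq_true, if_false, pvNbrsA, pvDfsA]
          rw [IH2 v gr stack]
          simp
        | succ f =>
          conv_lhs => rw [pvRunB.eq_def]
          simp only [hc, Bool.false_eq_true, if_false, pvNbrsA, pvDfsA]
          rw [IH f (Nat.lt_succ_self f)]
          rw [IH (f - (pvNbrsA g f (g.getD n []) (PySem.Set.add v n) (gr ++ [n])).1)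
                (by omega)]
          simp only [Nat.add_sub_add_right]
          congr 1
          omega

-- The neighbor loop only appends to the group.
theorem pvNbrsA_prefix (g : PySem.Dict Int (List Int)) :
    ∀ (fuel : Nat) (nbrs : List Int) (v : PySem.Set Int) (gr : List Int),
      ∃ t, (pvNbrsA g fuel nbrs v gr).2.2 = gr ++ t := by
  intro fuel
  induction fuel using Nat.strong_induction_on with
  | _ fuel IH =>
    intro nbrs
    induction nbrs with
    | nil => intro v gr; exact ⟨[], by simp [pvNbrsA]⟩
    | cons n rest IH2 =>
      intro v gr
      by_cases hc : PySem.Set.contains v n = true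
      · simpa only [pvNbrsA, hc, if_true] using IH2 v gr
      · rw [Bool.not_eq_true] at hc
        cases fuel with
        | zero =>
          simp only [pvNbrsA, pvDfsA, hc, Bool.false_eq_true, if_false]
          exact IH2 v gr
        | succ f =>
          simp only [pvNbrsA, pvDfsA, hc, Bool.false_eq_true, if_false]
          obtain ⟨t1, ht1⟩ := IH f (Nat.lt_succ_self f) (g.getD n []) (PySem.Set.add v n) (gr ++ [n])
          obtain ⟨t2, ht2⟩ := IH (f - (pvNbrsA g f (g.getD n []) (PySem.Set.add v n) (gr ++ [n])).1)
            (by omega) rest (pvNbrsA g f (g.getD n []) (PySem.Set.add v n) (gr ++ [n])).2.1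
            (pvNbrsA g f (g.getD n []) (PySem.Set.add v n) (gr ++ [n])).2.2
          refine ⟨[n] ++ t1 ++ t2, ?_⟩
          simp only [Nat.add_sub_add_right]
          rw [ht2, ht1]
          simp

-- ===== VERDICT (by name: the statement is the Claim_ definition above) =====
theorem group_dependencies_spec : Claim_equal_group_dependencies := by
  intro num_reqs dependencies _
  unfold Spec_group_dependencies
  simp only [group_dependencies, group_dependencies_alt]
  refine congrArg Prod.snd ?_
  refine PySem.List.foldl_congr_mem _ _ _ _ ?_
  intro st i _
  by_cases hc : PySem.Set.contains st.1 i = true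
  · simp only [hc, if_true]
  · rw [Bool.not_eq_true] at hc
    simp only [hc, Bool.false_eq_true, if_false, pvDfsA, List.nil_append]
    rw [pvRunB_sim]
    obtain ⟨t, ht⟩ := pvNbrsA_prefix (pvBuildGraph dependencies)
      (num_reqs.toNat + 2 * dependencies.length) ((pvBuildGraph dependencies).getD i [])
      (PySem.Set.add st.1 i) [i]
    rw [ht]
    simp [pvRunB]
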